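-- pv_equiv track=rewrite | github.com/paiml/depyler | examples/hard_realworld_json_build.py | int_to_str
-- ===== SOURCE A (Python) =====
-- def int_to_str(num: int) -> str:
--     """Convert integer to string representation."""
--     if num == 0:
--         return "0"
--     is_neg: int = 0
--     val: int = num
--     if val < 0:
--         is_neg = 1
--         val = 0 - val
--     digits: str = ""
--     while val > 0:
--         remainder: int = val % 10
--         digits = chr(ord("0") + remainder) + digits
--         val = val // 10
--     if is_neg == 1:
--         return "-" + digits
--     return digits
-- ===== SOURCE B (Python) =====
-- def int_to_str(num: int) -> str:
--     """Convert integer to string representation (recursive on num // 10)."""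
--     if num == 0:
--         return "0"
--     if num < 0:
--         return "-" + int_to_str(-num)
--     if num < 10:
--         return chr(ord("0") + num)
--     return int_to_str(num // 10) + chr(ord("0") + num % 10)
-- ===== Notes on version B (the rewrite author's own statement) =====
-- stated objective: alternative
-- what changed: Replaces the explicit while-loop that peels least-significant digits and prepends them to an accumulator string with a direct recursion on the quotient by ten that builds the string most-significant-first, with no accumulator or negativity flag.
import Mathlib
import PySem

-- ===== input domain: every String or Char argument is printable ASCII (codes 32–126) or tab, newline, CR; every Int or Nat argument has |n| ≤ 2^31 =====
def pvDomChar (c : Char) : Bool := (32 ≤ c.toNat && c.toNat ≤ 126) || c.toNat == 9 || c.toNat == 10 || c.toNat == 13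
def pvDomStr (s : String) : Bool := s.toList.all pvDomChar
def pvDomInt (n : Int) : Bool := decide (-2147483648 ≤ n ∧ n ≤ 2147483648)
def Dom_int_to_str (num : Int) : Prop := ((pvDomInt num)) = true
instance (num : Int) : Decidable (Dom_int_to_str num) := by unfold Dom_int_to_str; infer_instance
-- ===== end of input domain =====

-- ===== PORT A =====
-- the while-loop of A: peel least-significant digit, prepend to the accumulator
def int_to_str_loop (val : Int) (digits : String) : String :=
  if h : val > 0 then
    int_to_str_loop (PySem.Int.floordiv val 10)
      (String.mk [Char.ofNat (48 + PySem.Int.mod val 10).toNat] ++ digits)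
  else digits
termination_by val.toNat
decreasing_by
  have := PySem.Int.floordiv_eq_ediv_of_pos (a := val) (b := 10) (by omega)
  omega

def int_to_str (num : Int) : String :=
  if num == 0 then "0"
  else
    let p : Int × Int := if num < 0 then (1, 0 - num) else (0, num)
    let digits := int_to_str_loop p.2 ""
    if p.1 == 1 then "-" ++ digits else digits

-- ===== PORT B =====
def int_to_str_alt (num : Int) : String :=
  if num == 0 then "0"
  else if num < 0 then "-" ++ int_to_str_alt (-num)
  else if num < 10 then String.mk [Char.ofNat (48 + num).toNat]
  else int_to_str_alt (PySem.Int.floordiv num 10)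
         ++ String.mk [Char.ofNat (48 + PySem.Int.mod num 10).toNat]
termination_by (if num < 0 then 1 else 0) + 2 * num.natAbs
decreasing_by
  · simp only [Int.natAbs_neg]; split_ifs <;> omega
  · have := PySem.Int.floordiv_eq_ediv_of_pos (a := num) (b := 10) (by omega)
    split_ifs <;> omega

-- ===== PRECONDITION & SPEC =====
def Spec_int_to_str (num : Int) (out : String) : Prop := out = int_to_str_alt num
instance (num : Int) (out : String) : Decidable (Spec_int_to_str num out) := by unfold Spec_int_to_str; infer_instance

-- ===== CLAIM (what is proved, stated in full; the proofs are below) =====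
def Claim_equal_int_to_str : Prop := ∀ (num : Int), Dom_int_to_str num → Spec_int_to_str num (int_to_str num)

-- ===== LEMMAS AND PROOFS =====

-- the loop of A, started on a positive value, produces B's digit string prepended to the accumulator
theorem loop_eq_alt (n : Nat) : ∀ (val : Int), val.toNat ≤ n → 0 < val →
    ∀ (digits : String), int_to_str_loop val digits = int_to_str_alt val ++ digits := by
  induction n with
  | zero => intro val hle hpos; omega
  | succ n ih =>
    intro val hle hpos digits
    have hdiv := PySem.Int.floordiv_eq_ediv_of_pos (a := val) (b := 10) (by omega)
    have hmod := PySem.Int.mod_eq_emod_of_pos (a := val) (b := 10) (by omega)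
    rw [int_to_str_loop]
    simp only [hpos, dif_pos]
    by_cases h10 : val < 10
    · have hq : PySem.Int.floordiv val 10 = 0 := by omega
      have hm : PySem.Int.mod val 10 = val := by omega
      rw [hq, hm, int_to_str_loop]
      simp only [show ¬((0:Int) > 0) by omega, dif_neg, not_false_iff]
      rw [int_to_str_alt]
      simp only [show (val == 0) = false by simp; omega,
        show ¬(val < 0) by omega, if_false, h10, if_pos, Bool.false_eq_true]
    · have hqpos : 0 < PySem.Int.floordiv val 10 := by omega
      have hqle : (PySem.Int.floordiv val 10).toNat ≤ n := by omega
      rw [ih _ hqle hqpos]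
      conv_rhs => rw [int_to_str_alt]
      simp only [show (val == 0) = false by simp; omega,
        show ¬(val < 0) by omega, if_false, show ¬(val < 10) by omega, Bool.false_eq_true]
      rw [String.append_assoc]

theorem append_empty_str (s : String) : s ++ "" = s := by
  simp

-- ===== VERDICT (by name: the statement is the Claim_ definition above) =====
theorem int_to_str_spec : Claim_equal_int_to_str := by
  intro num _
  unfold Spec_int_to_str int_to_str
  by_cases h0 : num = 0
  · subst h0; rw [int_to_str_alt]; norm_num
  · simp only [show (num == 0) = false by simp [h0], Bool.false_eq_true, if_false]
    by_cases hneg : num < 0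
    · simp only [hneg, if_pos]
      have hpos : 0 < 0 - num := by omega
      rw [loop_eq_alt (0 - num).toNat _ le_rfl hpos, append_empty_str]
      conv_rhs => rw [int_to_str_alt]
      simp only [show (num == 0) = false by simp [h0], Bool.false_eq_true, if_false, hneg, if_pos]
      norm_num
    · simp only [hneg, if_neg, not_false_iff]
      have hpos : 0 < num := by omega
      rw [loop_eq_alt num.toNat _ le_rfl hpos, append_empty_str]
      simp
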